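-- pv_equiv track=rewrite | github.com/ss4621-dev/Coding-Ninjas---Data-Structures-and-Algorithms-in-Python | Priority Queues - 2/Buy the Ticket.py | buyTicket
-- ===== SOURCE A (Python) =====
-- from queue import Queue
-- import heapq
--
-- def buyTicket(arr, k):
--     count=0
--     d={}
--     q=Queue()
--     for i in range(0, len(arr)):
--         q.put(i)
--         d[i]=arr[i]
--
--     heapq._heapify_max(arr)
--     pq=arr
--     while q.empty()==False:
--         curr=q.get()
--         if curr==k:
--             if d[curr]== pq[0]:
--                 count+=1
--                 return count
--             q.put(curr)
--         else:
--             if d[curr]==pq[0]: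
--                 count+=1
--                 heapq._heappop_max(pq)
--             else:
--                 q.put(curr)
--
--     return count
-- ===== SOURCE B (Python) =====
-- def buyTicket(arr, k):
--     # One iteration per ticket sold: find the current maximum among the people
--     # still in line, jump directly to the first such person in queue order,
--     # serve them, and rotate the line past them. No heap, no per-person requeue.
--     remaining = list(range(len(arr)))
--     count = 0
--     while remaining:
--         m = max(arr[i] for i in remaining)
--         j = next(t for t, i in enumerate(remaining) if arr[i] == m)
--         count += 1
--         if remaining[j] == k:
--             return count
--         remaining = remaining[j + 1:] + remaining[:j]
--     return count
-- ===== Notes on version B (the rewrite author's own statement) =====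
-- stated objective: simpler
-- what changed: Replaces A's max-heap plus FIFO queue that re-enqueues every non-maximal person one by one with a loop doing one iteration per ticket sold: scan the remaining line for the current maximum, serve the first such person, rotate the line past them.
import Mathlib
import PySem

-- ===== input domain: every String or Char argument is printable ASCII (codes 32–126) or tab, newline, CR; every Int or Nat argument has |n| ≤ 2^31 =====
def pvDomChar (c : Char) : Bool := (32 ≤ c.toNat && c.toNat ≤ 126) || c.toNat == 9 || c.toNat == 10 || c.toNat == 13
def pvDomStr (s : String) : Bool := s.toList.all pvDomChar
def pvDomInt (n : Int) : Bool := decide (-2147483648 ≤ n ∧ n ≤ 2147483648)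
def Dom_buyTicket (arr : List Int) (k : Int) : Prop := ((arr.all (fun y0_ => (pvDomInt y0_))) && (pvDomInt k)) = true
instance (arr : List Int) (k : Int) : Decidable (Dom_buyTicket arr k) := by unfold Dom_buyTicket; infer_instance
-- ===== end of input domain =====

-- B replaces A's max-heap + FIFO requeue simulation by one loop iteration per ticket sold
-- (find the current maximum in the remaining line, serve its first holder, rotate past it);
-- equivalence is about the RETURN value only (A heapifies `arr` in place, B does not mutate it).

-- ===== PORT A =====
-- heapq._heapify_max / _heappop_max are ported by their contract on what A observes:
-- after heapify pq[0] is the maximum of the stored values, and _heappop_max removes one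
-- maximum occurrence; A only ever reads pq[0] and pops, so this is exact for A's result.
def heapMaxA (pq : List Int) : Int := (PySem.List.max? pq (fun y => y)).getD 0  -- pq[0]; only read when pq ≠ []
def heapPopMaxA (pq : List Int) : List Int := pq.erase (heapMaxA pq)

-- the build loop `for i in range(0, len(arr)): q.put(i); d[i] = arr[i]`
def buyTicketInit (arr : List Int) : List Int × PySem.Dict Int Int :=
  (PySem.List.pyRange 0 arr.length 1).foldl
    (fun st i => (st.1 ++ [i], st.2.insert i (PySem.List.pyGetD arr i 0)))
    ([], PySem.Dict.empty)

-- the while loop; the fuel only makes the recursion total (proved sufficient below)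
def buyTicketLoop (d : PySem.Dict Int Int) (k : Int) :
    Nat → List Int → List Int → Int → Int
  | 0, _, _, count => count
  | fuel + 1, q, pq, count =>
    match q with
    | [] => count
    | curr :: rest =>
      if curr = k then
        if d.getD curr 0 = heapMaxA pq then count + 1
        else buyTicketLoop d k fuel (rest ++ [curr]) pq count
      else
        if d.getD curr 0 = heapMaxA pq then
          buyTicketLoop d k fuel rest (heapPopMaxA pq) (count + 1)
        else buyTicketLoop d k fuel (rest ++ [curr]) pq count

def buyTicket (arr : List Int) (k : Int) : Int :=
  buyTicketLoop (buyTicketInit arr).2 k (arr.length * (arr.length + 1) + 1)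
    (buyTicketInit arr).1 arr 0

-- ===== PORT B =====
-- value of person i (arr[i]; every index B uses is in range, so the default is never read)
def valB (arr : List Int) (i : Int) : Int := PySem.List.pyGetD arr i 0

theorem altServe_lt {g : Int → Int} {c : Int} {t : List Int} :
    (c :: t).findIdx (fun i => g i == ((PySem.List.max? ((c :: t).map g) (fun y => y)).getD 0))
      < (c :: t).length := by
  apply List.findIdx_lt_length_of_exists
  rcases h : PySem.List.max? ((c :: t).map g) (fun y => y) with _ | m
  · rw [PySem.List.max?_eq_none_iff] at h
    simp at h
  · have hm := PySem.List.max?_mem h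
    rcases List.mem_map.mp hm with ⟨i, hi, hgi⟩
    exact ⟨i, hi, by simp [h, hgi]⟩

def altLoop (g : Int → Int) (k : Int) (rem : List Int) (count : Int) : Int :=
  match rem with
  | [] => count
  | c :: t =>
    let m := (PySem.List.max? ((c :: t).map g) (fun y => y)).getD 0
    let j := (c :: t).findIdx (fun i => g i == m)
    if (c :: t)[j]! = k then count + 1
    else altLoop g k ((c :: t).drop (j + 1) ++ (c :: t).take j) (count + 1)
termination_by rem.length
decreasing_by
  have := @altServe_lt g c t
  simp only [List.length_cons, List.length_append, List.length_drop, List.length_take] at *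
  omega

def buyTicket_alt (arr : List Int) (k : Int) : Int :=
  altLoop (valB arr) k (PySem.List.pyRange 0 arr.length 1) 0

-- ===== PRECONDITION & SPEC =====
def Spec_buyTicket (arr : List Int) (k : Int) (out : Int) : Prop := out = buyTicket_alt arr k
instance (arr : List Int) (k : Int) (out : Int) : Decidable (Spec_buyTicket arr k out) := by unfold Spec_buyTicket; infer_instance

-- ===== CLAIM (what is proved, stated in full; the proofs are below) =====
def Claim_equal_buyTicket : Prop := ∀ (arr : List Int) (k : Int), Dom_buyTicket arr k → Spec_buyTicket arr k (buyTicket arr k)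

-- ===== LEMMAS AND PROOFS =====

-- max? with key id is determined by the multiset of elements
theorem max?_id_perm {l₁ l₂ : List Int} (h : l₁.Perm l₂) :
    PySem.List.max? l₁ (fun y => y) = PySem.List.max? l₂ (fun y => y) := by
  rcases h1 : PySem.List.max? l₁ (fun y => y) with _ | m₁
  · rw [PySem.List.max?_eq_none_iff] at h1
    subst h1
    have h2 : l₂ = [] := h.symm.eq_nil
    subst h2
    symm
    rw [PySem.List.max?_eq_none_iff]
  · rcases h2 : PySem.List.max? l₂ (fun y => y) with _ | m₂
    · rw [PySem.List.max?_eq_none_iff] at h2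
      subst h2
      have := PySem.List.max?_mem h1
      simp [h.mem_iff] at this
    · have hm1 := PySem.List.max?_mem h1
      have hm2 := PySem.List.max?_mem h2
      have hle1 := PySem.List.max?_isMax h2 m₁ (h.mem_iff.mp hm1)
      have hle2 := PySem.List.max?_isMax h1 m₂ (h.mem_iff.mpr hm2)
      simp only [Option.some.injEq]
      exact le_antisymm hle1 hle2

-- splitting a list at the first element satisfying p
theorem split_first {α : Type} (p : α → Prop) [DecidablePred p] :
    ∀ (l : List α), (∃ x ∈ l, p x) →
      ∃ a x b, l = a ++ x :: b ∧ p x ∧ ∀ y ∈ a, ¬ p y := by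
  intro l h
  induction l with
  | nil => simp at h
  | cons c t ih =>
    by_cases hc : p c
    · exact ⟨[], c, t, rfl, hc, by simp⟩
    · obtain ⟨x, hx, hpx⟩ := h
      have hxt : x ∈ t := by
        rcases List.mem_cons.mp hx with h' | h'
        · exact absurd (h' ▸ hpx) hc
        · exact h'
      obtain ⟨a, x', b, heq, hpx', hpre⟩ := ih ⟨x, hxt, hpx⟩
      exact ⟨c :: a, x', b, by rw [heq]; rfl, hpx', by
        intro y hy
        rcases List.mem_cons.mp hy with h' | h'
        · exact h' ▸ hc
        · exact hpre y h'⟩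

theorem findIdx_first {α : Type} (p : α → Bool) :
    ∀ (a : List α) (x : α) (b : List α), p x = true → (∀ y ∈ a, ¬ p y = true) →
      (a ++ x :: b).findIdx p = a.length := by
  intro a x b hx
  induction a with
  | nil => intro _; simp [List.findIdx_cons, hx]
  | cons y a' ih =>
    intro hpre
    have hy : p y = false := by
      have := hpre y (by simp)
      simpa using this
    rw [List.cons_append, List.findIdx_cons, hy]
    simp [ih (fun z hz => hpre z (List.mem_cons_of_mem _ hz))]

theorem getBang_append (a : List Int) (x : Int) (b : List Int) :
    (a ++ x :: b)[a.length]! = x := by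
  induction a with
  | nil => simp
  | cons y a' ih => simpa using ih

-- scanning past a prefix of non-maximal people just rotates the queue
theorem rot_lemma (d : PySem.Dict Int Int) (k : Int) (pq : List Int) (count : Int) (m : Int)
    (hm : heapMaxA pq = m) :
    ∀ (a : List Int) (x : Int) (b : List Int) (fuel : Nat),
      (∀ y ∈ a, d.getD y 0 ≠ m) →
      buyTicketLoop d k (a.length + fuel) (a ++ x :: b) pq count
        = buyTicketLoop d k fuel (x :: (b ++ a)) pq count := by
  intro a
  induction a with
  | nil => intro x b fuel _; simp
  | cons y a' ih =>
    intro x b fuel hpre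
    have hy : d.getD y 0 ≠ heapMaxA pq := by rw [hm]; exact hpre y (by simp)
    have hlen : (y :: a').length + fuel = (a'.length + fuel) + 1 := by simp; omega
    rw [hlen]
    show buyTicketLoop d k ((a'.length + fuel) + 1) (y :: (a' ++ x :: b)) pq count = _
    by_cases hyk : y = k
    · simp only [buyTicketLoop, if_pos hyk, if_neg hy]
      have := ih x (b ++ [y]) fuel (fun z hz => hpre z (by simp [hz]))
      simpa [List.append_assoc] using this
    · simp only [buyTicketLoop, if_neg hyk, if_neg hy]
      have := ih x (b ++ [y]) fuel (fun z hz => hpre z (by simp [hz]))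
      simpa [List.append_assoc] using this

-- one unfolding step of altLoop on a non-empty line
theorem altLoop_cons (g : Int → Int) (k c : Int) (t : List Int) (count : Int) :
    altLoop g k (c :: t) count =
      (let m := (PySem.List.max? ((c :: t).map g) (fun y => y)).getD 0
       let j := (c :: t).findIdx (fun i => g i == m)
       if (c :: t)[j]! = k then count + 1
       else altLoop g k ((c :: t).drop (j + 1) ++ (c :: t).take j) (count + 1)) := by
  rw [altLoop.eq_def]

-- main invariant: the fueled heap/queue loop equals the per-serve loop
theorem main_lemma (g : Int → Int) (d : PySem.Dict Int Int) (k : Int) :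
    ∀ (n : Nat) (q pq : List Int) (count : Int) (fuel : Nat),
      q.length ≤ n → pq.Perm (q.map g) → (∀ i ∈ q, d.getD i 0 = g i) →
      q.length * (q.length + 1) + 1 ≤ fuel →
      buyTicketLoop d k fuel q pq count = altLoop g k q count := by
  intro n
  induction n with
  | zero =>
    intro q pq count fuel hlen _ _ hfuel
    have : q = [] := List.length_eq_zero_iff.mp (Nat.le_zero.mp hlen)
    subst this
    obtain ⟨f, rfl⟩ : ∃ f, fuel = f + 1 := ⟨fuel - 1, by omega⟩
    simp [buyTicketLoop, altLoop]
  | succ n ih =>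
    intro q pq count fuel hlen hperm hd hfuel
    match q with
    | [] =>
      obtain ⟨f, rfl⟩ : ∃ f, fuel = f + 1 := ⟨fuel - 1, by omega⟩
      simp [buyTicketLoop, altLoop]
    | c :: t =>
      rcases hmax : PySem.List.max? ((c :: t).map g) (fun y => y) with _ | m
      · rw [PySem.List.max?_eq_none_iff] at hmax; simp at hmax
      obtain ⟨i0, hi0, hgi0⟩ := List.mem_map.mp (PySem.List.max?_mem hmax)
      obtain ⟨a, x, b, heq, hgx, hpre⟩ :=
        split_first (fun i => g i = m) (c :: t) ⟨i0, hi0, hgi0⟩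
      have hpq : heapMaxA pq = m := by
        unfold heapMaxA
        rw [max?_id_perm hperm, hmax]
        rfl
      have hlen' : (c :: t).length = a.length + b.length + 1 := by
        rw [heq]; simp only [List.length_append, List.length_cons]; omega
      have hafuel : a.length + 1 ≤ fuel := by
        have h2 : (c :: t).length ≤ (c :: t).length * ((c :: t).length + 1) + 1 := by nlinarith
        omega
      obtain ⟨f'', hfsplit⟩ : ∃ f'', fuel = a.length + (f'' + 1) :=
        ⟨fuel - a.length - 1, by omega⟩
      have hdpre : ∀ y ∈ a, d.getD y 0 ≠ m := by
        intro y hy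
        have hyq : y ∈ c :: t := by rw [heq]; exact List.mem_append_left _ hy
        rw [hd y hyq]
        exact hpre y hy
      conv_lhs => rw [heq, hfsplit]
      rw [rot_lemma d k pq count m hpq a x b (f'' + 1) hdpre]
      have hxq : x ∈ c :: t := by rw [heq]; simp
      have hdx : d.getD x 0 = heapMaxA pq := by rw [hd x hxq, hpq]; exact hgx
      -- B's step: j = a.length, served person = x, new line = b ++ a
      have hj : (c :: t).findIdx (fun i => g i == m) = a.length := by
        rw [heq]
        exact findIdx_first _ a x b (by simp [hgx]) (by intro y hy; simp [hpre y hy])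
      have hserved : (c :: t)[(c :: t).findIdx (fun i => g i == m)]! = x := by
        rw [hj, heq]; exact getBang_append a x b
      have hdrop : (c :: t).drop ((c :: t).findIdx (fun i => g i == m) + 1) = b := by
        rw [hj, heq]
        have : a ++ x :: b = (a ++ [x]) ++ b := by simp
        rw [this, List.drop_left' (by simp)]
      have htake : (c :: t).take ((c :: t).findIdx (fun i => g i == m)) = a := by
        rw [hj, heq, List.take_left' rfl]
      by_cases hxk : x = k
      · simp only [buyTicketLoop, if_pos hxk, if_pos hdx]
        rw [altLoop_cons]
        simp only [hmax, Option.getD_some, hserved, hxk]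
        simp
      · simp only [buyTicketLoop, if_neg hxk, if_pos hdx]
        rw [altLoop_cons]
        simp only [hmax, Option.getD_some, hserved, if_neg hxk, hdrop, htake]
        -- apply the induction hypothesis to the shorter line b ++ a
        have hperm' : (heapPopMaxA pq).Perm ((b ++ a).map g) := by
          unfold heapPopMaxA
          rw [hpq]
          have h1 : (pq.erase m).Perm (((c :: t).map g).erase m) := hperm.erase m
          have h2 : ((c :: t).map g).erase m = a.map g ++ b.map g := by
            rw [heq]
            simp only [List.map_append, List.map_cons]
            rw [List.erase_append_right _ (by
              intro hmem
              rcases List.mem_map.mp hmem with ⟨y, hy, hgy⟩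
              exact hpre y hy hgy)]
            rw [hgx, List.erase_cons_head]
          refine h1.trans ?_
          rw [h2, List.map_append]
          exact List.perm_append_comm
        refine ih (b ++ a) (heapPopMaxA pq) (count + 1) f'' ?_ hperm' ?_ ?_
        · have : (c :: t).length ≤ n + 1 := hlen
          simp only [List.length_append] at *
          omega
        · intro i hi
          apply hd
          rw [heq]
          rcases List.mem_append.mp hi with h' | h'
          · exact List.mem_append_right _ (List.mem_cons_of_mem _ h')
          · exact List.mem_append_left _ h'
        · have h1 : (b ++ a).length = a.length + b.length := by simp; omega
          nlinarith [hlen', hfuel, hfsplit]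

theorem initFold_fst (arr : List Int) :
    ∀ (l : List Int) (acc : List Int × PySem.Dict Int Int),
      (l.foldl (fun st i => (st.1 ++ [i], st.2.insert i (PySem.List.pyGetD arr i 0))) acc).1
        = acc.1 ++ l := by
  intro l
  induction l with
  | nil => intro acc; simp
  | cons c t ih => intro acc; rw [List.foldl_cons, ih]; simp

theorem init_fst (arr : List Int) :
    (buyTicketInit arr).1 = PySem.List.pyRange 0 arr.length 1 := by
  unfold buyTicketInit
  rw [initFold_fst]
  simp

theorem initFold_snd_getD (arr : List Int) :
    ∀ (l : List Int) (acc : List Int × PySem.Dict Int Int) (i : Int),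
      (l.foldl (fun st j => (st.1 ++ [j], st.2.insert j (PySem.List.pyGetD arr j 0))) acc).2.getD i 0
        = if i ∈ l then PySem.List.pyGetD arr i 0 else acc.2.getD i 0 := by
  intro l
  induction l with
  | nil => intro acc i; simp
  | cons c t ih =>
    intro acc i
    rw [List.foldl_cons, ih]
    by_cases hit : i ∈ t
    · simp [hit]
    · by_cases hic : i = c
      · subst hic
        simp [hit, PySem.Dict.getD_insert]
      · simp [hit, hic, PySem.Dict.getD_insert]

theorem init_snd_getD (arr : List Int) :
    ∀ i ∈ PySem.List.pyRange 0 arr.length 1,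
      (buyTicketInit arr).2.getD i 0 = valB arr i := by
  intro i hi
  unfold buyTicketInit valB
  rw [initFold_snd_getD]
  simp [hi]

theorem map_val_range (arr : List Int) :
    (PySem.List.pyRange 0 arr.length 1).map (valB arr) = arr := by
  unfold valB
  exact PySem.List.map_pyGetD_pyRange_zero arr 0

-- ===== VERDICT (by name: the statement is the Claim_ definition above) =====
theorem buyTicket_spec : Claim_equal_buyTicket := by
  intro arr k _
  unfold Spec_buyTicket buyTicket buyTicket_alt
  rw [init_fst]
  refine main_lemma (valB arr) _ k (PySem.List.pyRange 0 arr.length 1).length _ _ 0 _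
    le_rfl ?_ (init_snd_getD arr) ?_
  · rw [map_val_range]
  · simp [PySem.List.length_pyRange_one]
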